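-- pv_equiv track=rewrite | github.com/DitteGilsfeldt/Project_DTU | Introduction_to_programming/Projekt_2/grades_main.py | roundGrade
-- ===== SOURCE A (Python) =====
-- def roundGrade(grades):
--     #Rounds a number to the nearest possible grade
--     grades = grades.copy()
--     gradesRounded = []
--     options = [-3, 0, 2, 4, 7, 10, 12]
--     for grade in grades:
--         new_grade = min(options, key=lambda x: abs(x - grade))
--         gradesRounded.append(new_grade)
--     return gradesRounded
-- ===== SOURCE B (Python) =====
-- def roundGrade(grades):
--     # Rounds each grade to the nearest allowed grade by a binary search over the
--     # precomputed (doubled, to stay in integers) midpoints between consecutive options.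
--     grades = grades.copy()
--     options = [-3, 0, 2, 4, 7, 10, 12]
--     cuts = [-3, 2, 6, 11, 17, 22]  # 2 * midpoint between consecutive options
--
--     def bisect_left(a, x):
--         lo, hi = 0, len(a)
--         while lo < hi:
--             mid = (lo + hi) // 2
--             if a[mid] < x:
--                 lo = mid + 1
--             else:
--                 hi = mid
--         return lo
--
--     return [options[bisect_left(cuts, 2 * g)] for g in grades]
-- ===== Notes on version B (the rewrite author's own statement) =====
-- stated objective: faster
-- what changed: Replaces the per-grade linear min-scan of all seven options (min with an abs-distance key) by a precomputed doubled-midpoint threshold table searched with a hand-written bisect_left, so each grade is placed by binary search with ties on a midpoint rounding down exactly as min's first-minimum rule does.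
import Mathlib
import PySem

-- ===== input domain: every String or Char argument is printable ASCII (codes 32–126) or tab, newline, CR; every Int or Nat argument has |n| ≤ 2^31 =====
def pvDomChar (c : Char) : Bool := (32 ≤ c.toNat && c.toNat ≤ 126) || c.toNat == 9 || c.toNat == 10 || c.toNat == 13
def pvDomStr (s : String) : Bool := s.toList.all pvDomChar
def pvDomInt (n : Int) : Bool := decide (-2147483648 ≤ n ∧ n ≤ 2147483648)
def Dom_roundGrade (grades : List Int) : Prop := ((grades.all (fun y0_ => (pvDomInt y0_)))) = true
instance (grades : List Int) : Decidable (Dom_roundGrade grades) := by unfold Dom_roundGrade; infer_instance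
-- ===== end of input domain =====

-- B rounds each grade by a binary search over the six precomputed (doubled) midpoints between
-- consecutive allowed grades, instead of A's per-grade linear min-scan of all seven options;
-- equivalence of the RETURN values (A's `grades.copy()` has no observable effect).

-- ===== PORT A =====
def roundGrade (grades : List Int) : List Int :=
  let gradesCopy := grades          -- grades = grades.copy()
  let options : List Int := [-3, 0, 2, 4, 7, 10, 12]
  gradesCopy.foldl (fun gradesRounded grade =>
    gradesRounded ++ [(PySem.List.min? options (fun x => |x - grade|)).getD 0]) []
    -- min(options, key=…) on the non-empty literal list is always `some`; getD 0 unwraps it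

-- ===== PORT B =====
-- hand-written bisect_left of Source B: while lo < hi: mid = (lo+hi)//2; …
def pvBisect (cuts : List Int) (x : Int) (lo hi : Nat) : Nat :=
  if h : lo < hi then
    let mid := (lo + hi) / 2
    if cuts.getD mid 0 < x then pvBisect cuts x (mid + 1) hi
    else pvBisect cuts x lo mid
  else lo
termination_by hi - lo
decreasing_by all_goals omega

def roundGrade_alt (grades : List Int) : List Int :=
  let gradesCopy := grades          -- grades = grades.copy()
  let options : List Int := [-3, 0, 2, 4, 7, 10, 12]
  let cuts : List Int := [-3, 2, 6, 11, 17, 22]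
  gradesCopy.map (fun g => options.getD (pvBisect cuts (2 * g) 0 cuts.length) 0)

-- ===== PRECONDITION & SPEC =====
def Spec_roundGrade (grades : List Int) (out : List Int) : Prop := out = roundGrade_alt grades
instance (grades : List Int) (out : List Int) : Decidable (Spec_roundGrade grades out) := by unfold Spec_roundGrade; infer_instance

-- ===== CLAIM (what is proved, stated in full; the proofs are below) =====
def Claim_equal_roundGrade : Prop := ∀ (grades : List Int), Dom_roundGrade grades → Spec_roundGrade grades (roundGrade grades)

-- ===== LEMMAS AND PROOFS =====

lemma pvBisect_refl (c : List Int) (x : Int) (l : Nat) : pvBisect c x l l = l := by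
  rw [pvBisect]; simp

-- full evaluation of the binary search over the literal cut table
lemma pvBisect_eval (x : Int) : pvBisect [-3, 2, 6, 11, 17, 22] x 0 6 =
    if 11 < x then (if 22 < x then 6 else if 17 < x then 5 else 4)
    else if 2 < x then (if 6 < x then 3 else 2)
    else if -3 < x then 1 else 0 := by
  rw [pvBisect]; norm_num
  rw [pvBisect, pvBisect]; norm_num
  rw [pvBisect, pvBisect, pvBisect, pvBisect]; norm_num
  split_ifs <;> simp [pvBisect_refl]

-- Python's min(xs, key) on a non-empty list is the first-minimum fold over the tail
lemma min?_cons {α : Type} (k : α → Int) (x : α) (xs : List α) :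
    PySem.List.min? (x :: xs) k = some (xs.foldl (fun m y => if k y < k m then y else m) x) := by
  suffices h : ∀ (a : α), List.foldl
      (fun acc y => match acc with
        | none => some y
        | some m => if k y < k m then some y else some m) (some a) xs
      = some (xs.foldl (fun m y => if k y < k m then y else m) a) by
    simpa [PySem.List.min?, List.foldl] using h x
  induction xs with
  | nil => intro a; simp
  | cons y ys ih =>
    intro a
    simp only [List.foldl]
    split_ifs <;> exact ih _

lemma abs_lt_abs_int (a b : Int) : |a| < |b| ↔ (a < b ∧ -b < a) ∨ (b < a ∧ a < -b) := by
  rcases abs_cases a with ⟨h1,h2⟩|⟨h1,h2⟩ <;> rcases abs_cases b with ⟨h3,h4⟩|⟨h3,h4⟩ <;> omega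

-- per-grade agreement: the first-minimum scan equals indexing by the binary search
lemma point_eq (g : Int) :
    (PySem.List.min? ([-3, 0, 2, 4, 7, 10, 12] : List Int) (fun x => |x - g|)).getD 0
    = ([-3, 0, 2, 4, 7, 10, 12] : List Int).getD (pvBisect [-3, 2, 6, 11, 17, 22] (2 * g) 0 6) 0 := by
  rw [min?_cons, pvBisect_eval]
  rcases show (2*g ≤ -3) ∨ (-3 < 2*g ∧ 2*g ≤ 2) ∨ (2 < 2*g ∧ 2*g ≤ 6) ∨ (6 < 2*g ∧ 2*g ≤ 11) ∨ (11 < 2*g ∧ 2*g ≤ 17) ∨ (17 < 2*g ∧ 2*g ≤ 22) ∨ (22 < 2*g) from by omega with h0|h1|h2|h3|h4|h5|h6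
  ·
    have c0 : (|(0:Int) - g| < |(-3:Int) - g|) = (False) := eq_false (by rw [abs_lt_abs_int]; omega)
    have c1 : (|(2:Int) - g| < |(-3:Int) - g|) = (False) := eq_false (by rw [abs_lt_abs_int]; omega)
    have c2 : (|(4:Int) - g| < |(-3:Int) - g|) = (False) := eq_false (by rw [abs_lt_abs_int]; omega)
    have c3 : (|(7:Int) - g| < |(-3:Int) - g|) = (False) := eq_false (by rw [abs_lt_abs_int]; omega)
    have c4 : (|(10:Int) - g| < |(-3:Int) - g|) = (False) := eq_false (by rw [abs_lt_abs_int]; omega)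
    have c5 : (|(12:Int) - g| < |(-3:Int) - g|) = (False) := eq_false (by rw [abs_lt_abs_int]; omega)
    simp only [List.foldl, c0, c1, c2, c3, c4, c5, if_false, Option.getD]
    split_ifs <;> simp <;> omega
  ·
    have c0 : (|(0:Int) - g| < |(-3:Int) - g|) = (True) := eq_true (by rw [abs_lt_abs_int]; omega)
    have c1 : (|(2:Int) - g| < |(0:Int) - g|) = (False) := eq_false (by rw [abs_lt_abs_int]; omega)
    have c2 : (|(4:Int) - g| < |(0:Int) - g|) = (False) := eq_false (by rw [abs_lt_abs_int]; omega)
    have c3 : (|(7:Int) - g| < |(0:Int) - g|) = (False) := eq_false (by rw [abs_lt_abs_int]; omega)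
    have c4 : (|(10:Int) - g| < |(0:Int) - g|) = (False) := eq_false (by rw [abs_lt_abs_int]; omega)
    have c5 : (|(12:Int) - g| < |(0:Int) - g|) = (False) := eq_false (by rw [abs_lt_abs_int]; omega)
    simp only [List.foldl, c0, c1, c2, c3, c4, c5, if_true, if_false, Option.getD]
    split_ifs <;> simp <;> omega
  ·
    have c0 : (|(0:Int) - g| < |(-3:Int) - g|) = (True) := eq_true (by rw [abs_lt_abs_int]; omega)
    have c1 : (|(2:Int) - g| < |(0:Int) - g|) = (True) := eq_true (by rw [abs_lt_abs_int]; omega)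
    have c2 : (|(4:Int) - g| < |(2:Int) - g|) = (False) := eq_false (by rw [abs_lt_abs_int]; omega)
    have c3 : (|(7:Int) - g| < |(2:Int) - g|) = (False) := eq_false (by rw [abs_lt_abs_int]; omega)
    have c4 : (|(10:Int) - g| < |(2:Int) - g|) = (False) := eq_false (by rw [abs_lt_abs_int]; omega)
    have c5 : (|(12:Int) - g| < |(2:Int) - g|) = (False) := eq_false (by rw [abs_lt_abs_int]; omega)
    simp only [List.foldl, c0, c1, c2, c3, c4, c5, if_true, if_false, Option.getD]
    split_ifs <;> simp <;> omega
  ·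
    have c0 : (|(0:Int) - g| < |(-3:Int) - g|) = (True) := eq_true (by rw [abs_lt_abs_int]; omega)
    have c1 : (|(2:Int) - g| < |(0:Int) - g|) = (True) := eq_true (by rw [abs_lt_abs_int]; omega)
    have c2 : (|(4:Int) - g| < |(2:Int) - g|) = (True) := eq_true (by rw [abs_lt_abs_int]; omega)
    have c3 : (|(7:Int) - g| < |(4:Int) - g|) = (False) := eq_false (by rw [abs_lt_abs_int]; omega)
    have c4 : (|(10:Int) - g| < |(4:Int) - g|) = (False) := eq_false (by rw [abs_lt_abs_int]; omega)
    have c5 : (|(12:Int) - g| < |(4:Int) - g|) = (False) := eq_false (by rw [abs_lt_abs_int]; omega)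
    simp only [List.foldl, c0, c1, c2, c3, c4, c5, if_true, if_false, Option.getD]
    split_ifs <;> simp <;> omega
  ·
    have c0 : (|(0:Int) - g| < |(-3:Int) - g|) = (True) := eq_true (by rw [abs_lt_abs_int]; omega)
    have c1 : (|(2:Int) - g| < |(0:Int) - g|) = (True) := eq_true (by rw [abs_lt_abs_int]; omega)
    have c2 : (|(4:Int) - g| < |(2:Int) - g|) = (True) := eq_true (by rw [abs_lt_abs_int]; omega)
    have c3 : (|(7:Int) - g| < |(4:Int) - g|) = (True) := eq_true (by rw [abs_lt_abs_int]; omega)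
    have c4 : (|(10:Int) - g| < |(7:Int) - g|) = (False) := eq_false (by rw [abs_lt_abs_int]; omega)
    have c5 : (|(12:Int) - g| < |(7:Int) - g|) = (False) := eq_false (by rw [abs_lt_abs_int]; omega)
    simp only [List.foldl, c0, c1, c2, c3, c4, c5, if_true, if_false, Option.getD]
    split_ifs <;> simp <;> omega
  ·
    have c0 : (|(0:Int) - g| < |(-3:Int) - g|) = (True) := eq_true (by rw [abs_lt_abs_int]; omega)
    have c1 : (|(2:Int) - g| < |(0:Int) - g|) = (True) := eq_true (by rw [abs_lt_abs_int]; omega)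
    have c2 : (|(4:Int) - g| < |(2:Int) - g|) = (True) := eq_true (by rw [abs_lt_abs_int]; omega)
    have c3 : (|(7:Int) - g| < |(4:Int) - g|) = (True) := eq_true (by rw [abs_lt_abs_int]; omega)
    have c4 : (|(10:Int) - g| < |(7:Int) - g|) = (True) := eq_true (by rw [abs_lt_abs_int]; omega)
    have c5 : (|(12:Int) - g| < |(10:Int) - g|) = (False) := eq_false (by rw [abs_lt_abs_int]; omega)
    simp only [List.foldl, c0, c1, c2, c3, c4, c5, if_true, if_false, Option.getD]
    split_ifs <;> simp <;> omega
  ·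
    have c0 : (|(0:Int) - g| < |(-3:Int) - g|) = (True) := eq_true (by rw [abs_lt_abs_int]; omega)
    have c1 : (|(2:Int) - g| < |(0:Int) - g|) = (True) := eq_true (by rw [abs_lt_abs_int]; omega)
    have c2 : (|(4:Int) - g| < |(2:Int) - g|) = (True) := eq_true (by rw [abs_lt_abs_int]; omega)
    have c3 : (|(7:Int) - g| < |(4:Int) - g|) = (True) := eq_true (by rw [abs_lt_abs_int]; omega)
    have c4 : (|(10:Int) - g| < |(7:Int) - g|) = (True) := eq_true (by rw [abs_lt_abs_int]; omega)
    have c5 : (|(12:Int) - g| < |(10:Int) - g|) = (True) := eq_true (by rw [abs_lt_abs_int]; omega)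
    simp only [List.foldl, c0, c1, c2, c3, c4, c5, if_true, Option.getD]
    split_ifs <;> simp <;> omega

lemma foldl_append_eq_map (f : Int → Int) (l : List Int) :
    ∀ acc : List Int, l.foldl (fun a x => a ++ [f x]) acc = acc ++ l.map f := by
  induction l with
  | nil => intro acc; simp
  | cons x xs ih => intro acc; simp [List.foldl, ih]

-- ===== VERDICT (by name: the statement is the Claim_ definition above) =====
theorem roundGrade_spec : Claim_equal_roundGrade := by
  intro grades _
  show roundGrade grades = roundGrade_alt grades
  unfold roundGrade roundGrade_alt
  rw [foldl_append_eq_map]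
  simp only [List.nil_append, List.length_cons, List.length_nil]
  exact List.map_congr_left (fun g _ => point_eq g)
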